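-- pv_equiv track=rewrite | github.com/dashtit/homework4 | homeworks/hw8/sequence/hw8_solution.py | ascending_sequence
-- ===== SOURCE A (Python) =====
-- def ascending_sequence(arr: list) -> bool:
--     deletion = 0
--     flag = True
--     for i in range(len(arr) - 1):
--         if arr[i] >= arr[i + 1] and deletion >= 1:
--             flag = False
--         if arr[i] >= arr[i + 1] and deletion < 1:
--             deletion += 1
--         if i > 0 and arr[i - 1] >= arr[i + 1]:
--             flag = False
--     return flag
-- ===== SOURCE B (Python) =====
-- def strictly_increasing(xs):
--     for a, b in zip(xs, xs[1:]):
--         if a >= b: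
--             return False
--     return True
--
--
-- def deinterleave(xs):
--     evens, odds = [], []
--     i = 0
--     while i + 1 < len(xs):
--         evens.append(xs[i])
--         odds.append(xs[i + 1])
--         i += 2
--     if i < len(xs):
--         evens.append(xs[i])
--     return evens, odds
--
--
-- def ascending_sequence(arr: list) -> bool:
--     # The skip-pair condition arr[i-1] < arr[i+1] for all middles is exactly
--     # "both interleaved subsequences arr[0::2] and arr[1::2] are strictly
--     # increasing"; the deletion budget means: after the first adjacent descent
--     # the remaining suffix must already be strictly increasing.
--     evens, odds = deinterleave(arr)
--     if not (strictly_increasing(evens) and strictly_increasing(odds)):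
--         return False
--     for i in range(len(arr) - 1):
--         if arr[i] >= arr[i + 1]:
--             return strictly_increasing(arr[i + 1:])
--     return True
-- ===== Notes on version B (the rewrite author's own statement) =====
-- stated objective: alternative
-- what changed: B decides the predicate by a structurally different route: it de-interleaves the array into the even- and odd-indexed subsequences and checks each is strictly increasing (replacing A's skip-pair comparisons arr[i-1]>=arr[i+1]), and it replaces A's deletion counter by locating the first adjacent descent and requiring the suffix after it to be strictly increasing.
import Mathlib
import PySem

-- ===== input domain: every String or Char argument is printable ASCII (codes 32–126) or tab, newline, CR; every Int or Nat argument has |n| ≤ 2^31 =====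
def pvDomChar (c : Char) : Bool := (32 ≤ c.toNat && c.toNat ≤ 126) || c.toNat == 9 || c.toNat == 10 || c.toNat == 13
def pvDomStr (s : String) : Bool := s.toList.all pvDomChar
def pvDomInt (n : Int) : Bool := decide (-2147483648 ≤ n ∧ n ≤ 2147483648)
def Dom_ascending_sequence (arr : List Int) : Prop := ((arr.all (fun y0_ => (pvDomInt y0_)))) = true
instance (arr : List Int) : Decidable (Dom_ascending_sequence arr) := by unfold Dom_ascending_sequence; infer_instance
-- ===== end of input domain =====

-- B replaces A's stateful loop (flag + deletion counter + skip-pair test) by a different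
-- decomposition: de-interleave into even/odd-indexed subsequences checked strictly
-- increasing, plus first-descent localisation; objective: alternative, same O(n) cost.

-- ===== PORT A =====
-- A's loop body; all indices i, i+1, i-1 taken inside range(len-1) are in range
-- (i-1 only read when i > 0), so getD is exact for Python's arr[...]
def ascStep (arr : List Int) (st : Int × Bool) (i : Nat) : Int × Bool :=
  let flag := if arr.getD i 0 ≥ arr.getD (i+1) 0 ∧ st.1 ≥ 1 then false else st.2
  let deletion := if arr.getD i 0 ≥ arr.getD (i+1) 0 ∧ st.1 < 1 then st.1 + 1 else st.1
  let flag := if i > 0 ∧ arr.getD (i-1) 0 ≥ arr.getD (i+1) 0 then false else flag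
  (deletion, flag)

def ascending_sequence (arr : List Int) : Bool :=
  ((List.range (arr.length - 1)).foldl (ascStep arr) (0, true)).2

-- ===== PORT B =====
-- for a, b in zip(xs, xs[1:]): if a >= b: return False / return True
def siLoop : List (Int × Int) → Bool
  | [] => true
  | (a, b) :: t => if a ≥ b then false else siLoop t

def strictly_increasing (xs : List Int) : Bool := siLoop (xs.zip (xs.drop 1))

-- while i + 1 < len(xs): append xs[i], xs[i+1]; i += 2 — then the odd leftover
def deinterAux (xs : List Int) (e o : List Int) (i : Nat) : List Int × List Int :=
  if i + 1 < xs.length then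
    deinterAux xs (e ++ [xs.getD i 0]) (o ++ [xs.getD (i+1) 0]) (i + 2)
  else if i < xs.length then (e ++ [xs.getD i 0], o)
  else (e, o)
termination_by xs.length - i

def deinterleave (xs : List Int) : List Int × List Int := deinterAux xs [] [] 0

-- for i in range(len(arr)-1): if arr[i] >= arr[i+1]: return strictly_increasing(arr[i+1:])
def amodLoop (arr : List Int) : List Nat → Bool
  | [] => true
  | i :: t =>
    if arr.getD i 0 ≥ arr.getD (i+1) 0 then strictly_increasing (arr.drop (i+1))
    else amodLoop arr t

def ascending_sequence_alt (arr : List Int) : Bool :=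
  let p := deinterleave arr
  if !(strictly_increasing p.1 && strictly_increasing p.2) then false
  else amodLoop arr (List.range (arr.length - 1))

-- ===== PRECONDITION & SPEC =====
def Spec_ascending_sequence (arr : List Int) (out : Bool) : Prop := out = ascending_sequence_alt arr
instance (arr : List Int) (out : Bool) : Decidable (Spec_ascending_sequence arr out) := by unfold Spec_ascending_sequence; infer_instance

-- ===== CLAIM (what is proved, stated in full; the proofs are below) =====
def Claim_equal_ascending_sequence : Prop := ∀ (arr : List Int), Dom_ascending_sequence arr → Spec_ascending_sequence arr (ascending_sequence arr)

-- ===== LEMMAS AND PROOFS =====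

-- number of descents among the first k adjacent pairs
def dc (arr : List Int) (k : Nat) : Nat :=
  ((List.range k).filter (fun i => arr.getD i 0 ≥ arr.getD (i+1) 0)).length

-- skip-pair check over indices 1..k-1
def okp (arr : List Int) (k : Nat) : Bool :=
  (List.range' 1 (k - 1)).all (fun i => arr.getD (i-1) 0 < arr.getD (i+1) 0)

-- recursive de-interleave (proof-side model of deinterAux)
def dI : List Int → List Int × List Int
  | [] => ([], [])
  | [a] => ([a], [])
  | a :: b :: t => (a :: (dI t).1, b :: (dI t).2)

lemma loop_inv (arr : List Int) (k : Nat) :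
    (List.range k).foldl (ascStep arr) (0, true)
      = (((min (dc arr k) 1 : Nat) : Int), decide (dc arr k ≤ 1) && okp arr k) := by
  induction k with
  | zero => simp [dc, okp]
  | succ k ih =>
    rw [List.range_succ, List.foldl_append, ih]
    simp only [List.foldl_cons, List.foldl_nil]
    have hdc : dc arr (k+1) = dc arr k + (if arr[k+1]?.getD 0 ≤ arr[k]?.getD 0 then 1 else 0) := by
      simp only [dc, List.range_succ, List.filter_append, List.length_append,
        List.filter_cons, List.filter_nil, List.getD_eq_getElem?_getD, ge_iff_le]
      split_ifs with h <;> simp_all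
    have hok : okp arr (k+1) = (okp arr k &&
        (decide (k = 0) || decide (arr[k-1]?.getD 0 < arr[k+1]?.getD 0))) := by
      rcases k with _ | k
      · simp [okp]
      · simp only [okp, Nat.add_sub_cancel, List.range'_1_concat, List.all_append,
          List.all_cons, List.all_nil, List.getD_eq_getElem?_getD]
        simp [Nat.add_comm]
    rw [hdc, hok]
    simp only [ascStep, Prod.mk.injEq, List.getD_eq_getElem?_getD, ge_iff_le]
    refine ⟨?_, ?_⟩
    · by_cases hd : arr[k+1]?.getD 0 ≤ arr[k]?.getD 0
      · simp only [hd, true_and]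
        split_ifs <;> omega
      · simp [hd]
    · rcases Nat.eq_zero_or_pos k with hk0 | hk
      · subst hk0
        simp [dc, okp]
        split_ifs <;> simp_all
      · by_cases hs : arr[k+1]?.getD 0 ≤ arr[k-1]?.getD 0
        · have hlt : ¬ (arr[k-1]?.getD 0 < arr[k+1]?.getD 0) := not_lt.mpr hs
          simp [hk, hk.ne', hs, hlt]
        · have hlt : arr[k-1]?.getD 0 < arr[k+1]?.getD 0 := lt_of_not_ge hs
          simp only [hk, hk.ne', hs, hlt, decide_true, decide_false, Bool.false_or,
            and_false, if_neg, not_false_iff, Bool.and_true]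
          by_cases hd : arr[k+1]?.getD 0 ≤ arr[k]?.getD 0
          · simp only [hd, true_and]
            split_ifs with h
            · have h2 : ¬ (dc arr k + 1 ≤ 1) := by omega
              simp [h2]
            · have h0 : dc arr k = 0 := by omega
              simp [h0]
          · simp [hd]

-- strict-increase loop, characterised elementwise
lemma si_iff (xs : List Int) :
    strictly_increasing xs = true ↔
      ∀ k, k + 1 < xs.length → xs.getD k 0 < xs.getD (k+1) 0 := by
  induction xs with
  | nil => simp [strictly_increasing, siLoop]
  | cons a tl ih =>
    cases tl with
    | nil =>
      simp [strictly_increasing, siLoop]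
    | cons b t =>
      have hz : (a :: b :: t).zip ((a :: b :: t).drop 1) = (a, b) :: ((b :: t).zip t) := by
        simp [List.zip]
      have hz2 : (b :: t).drop 1 = t := rfl
      constructor
      · intro h k hk
        rw [strictly_increasing, hz] at h
        simp only [siLoop] at h
        by_cases hab : a ≥ b
        · simp [hab] at h
        · rcases k with _ | m
          · simpa using lt_of_not_ge hab
          · have := (ih).mp (by rw [strictly_increasing, hz2]; simpa [hab] using h)
            simpa using this m (by simpa using hk)
      · intro h
        rw [strictly_increasing, hz]
        have hab : a < b := by simpa using h 0 (by simp)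
        have hsi : strictly_increasing (b :: t) = true :=
          ih.mpr (fun k hk => by simpa using h (k+1) (by simpa using hk))
        have hsi' : siLoop ((b :: t).zip t) = true := by
          simpa [strictly_increasing] using hsi
        simp [siLoop, not_le.mpr hab, hsi']

-- the while loop equals the recursive de-interleave
lemma getD_drop' (xs : List Int) (i k : Nat) :
    (xs.drop i).getD k 0 = xs.getD (i + k) 0 := by
  simp [List.getD_eq_getElem?_getD, List.getElem?_drop]

lemma deinterAux_eq (xs : List Int) : ∀ i e o,
    deinterAux xs e o i = (e ++ (dI (xs.drop i)).1, o ++ (dI (xs.drop i)).2) := by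
  have key : ∀ n i e o, xs.length - i ≤ n →
      deinterAux xs e o i = (e ++ (dI (xs.drop i)).1, o ++ (dI (xs.drop i)).2) := by
    intro n
    induction n with
    | zero =>
      intro i e o h
      rw [deinterAux]
      have h1 : ¬ (i + 1 < xs.length) := by omega
      have h2 : ¬ (i < xs.length) := by omega
      simp [h1, h2, List.drop_eq_nil_of_le (by omega : xs.length ≤ i), dI]
    | succ n ih =>
      intro i e o h
      rw [deinterAux]
      by_cases h1 : i + 1 < xs.length
      · rw [if_pos h1, ih (i+2) _ _ (by omega)]
        have hd : xs.drop i = xs.getD i 0 :: xs.getD (i+1) 0 :: xs.drop (i+2) := by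
          rw [List.getD_eq_getElem xs 0 (by omega), List.getD_eq_getElem xs 0 (by omega),
            List.drop_eq_getElem_cons (by omega : i < xs.length),
            List.drop_eq_getElem_cons (by omega : i + 1 < xs.length)]
        rw [hd]
        simp [dI]
      · rw [if_neg h1]
        by_cases h2 : i < xs.length
        · rw [if_pos h2]
          have hd : xs.drop i = [xs.getD i 0] := by
            rw [List.getD_eq_getElem xs 0 (by omega),
              List.drop_eq_getElem_cons (by omega : i < xs.length),
              List.drop_eq_nil_of_le (by omega : xs.length ≤ i + 1)]
          rw [hd]
          simp [dI]
        · rw [if_neg h2]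
          simp [List.drop_eq_nil_of_le (by omega : xs.length ≤ i), dI]
  exact fun i e o => key (xs.length - i) i e o le_rfl

lemma deinterleave_eq (xs : List Int) : deinterleave xs = dI xs := by
  simp [deinterleave, deinterAux_eq]

lemma length_dI1 (xs : List Int) : (dI xs).1.length = (xs.length + 1) / 2 := by
  induction xs using dI.induct with
  | case1 => simp [dI]
  | case2 a => simp [dI]
  | case3 a b t ih => simp [dI, ih]; omega

lemma length_dI2 (xs : List Int) : (dI xs).2.length = xs.length / 2 := by
  induction xs using dI.induct with
  | case1 => simp [dI]
  | case2 a => simp [dI]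
  | case3 a b t ih => simp [dI, ih]; omega

lemma getD_dI1 (xs : List Int) : ∀ k, (dI xs).1.getD k 0 = xs.getD (2*k) 0 := by
  induction xs using dI.induct with
  | case1 => intro k; simp [dI]
  | case2 a => intro k; rcases k with _ | m <;> simp [dI, Nat.mul_succ]
  | case3 a b t ih =>
    intro k
    rcases k with _ | m
    · simp [dI]
    · rw [show 2 * (m + 1) = (2 * m + 1) + 1 from by ring]
      simp only [dI, List.getD_cons_succ]
      exact ih m

lemma getD_dI2 (xs : List Int) : ∀ k, (dI xs).2.getD k 0 = xs.getD (2*k+1) 0 := by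
  induction xs using dI.induct with
  | case1 => intro k; simp [dI]
  | case2 a => intro k; simp [dI]
  | case3 a b t ih =>
    intro k
    rcases k with _ | m
    · simp [dI]
    · rw [show 2 * (m + 1) + 1 = (2 * m + 1 + 1) + 1 from by ring]
      simp only [dI, List.getD_cons_succ]
      exact ih m

-- okp over the full range, elementwise
lemma okp_iff (xs : List Int) :
    okp xs (xs.length - 1) = true ↔
      ∀ j, j + 2 < xs.length → xs.getD j 0 < xs.getD (j+2) 0 := by
  simp only [okp, List.all_eq_true, List.mem_range'_1, decide_eq_true_iff]
  constructor
  · intro h j hj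
    have := h (j+1) ⟨by omega, by omega⟩
    simpa using this
  · rintro h i ⟨h1, h2⟩
    have := h (i-1) (by omega)
    rw [show i - 1 + 2 = i + 1 from by omega, show i - 1 = i - 1 from rfl] at this
    exact this

-- "at most one descent" as a two-descent impossibility
def NoTwo (xs : List Int) : Prop :=
  ∀ i j, i < j → j + 1 < xs.length →
    xs.getD i 0 ≥ xs.getD (i+1) 0 → xs.getD j 0 ≥ xs.getD (j+1) 0 → False

lemma dcLe1_iff (xs : List Int) : dc xs (xs.length - 1) ≤ 1 ↔ NoTwo xs := by
  unfold dc NoTwo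
  set p : Nat → Bool := fun i => decide (xs.getD i 0 ≥ xs.getD (i+1) 0) with hp
  set l : List Nat := (List.range (xs.length - 1)).filter p with hl
  have hpw : l.Pairwise (· < ·) := (List.pairwise_lt_range).filter p
  constructor
  · intro hlen i j hij hj hi hdj
    have hmi : i ∈ l := by
      rw [hl]
      exact List.mem_filter.mpr ⟨List.mem_range.mpr (by omega), by simp [hp]; exact hi⟩
    have hmj : j ∈ l := by
      rw [hl]
      exact List.mem_filter.mpr ⟨List.mem_range.mpr (by omega), by simp [hp]; exact hdj⟩
    have hsub : ({i, j} : Finset Nat) ⊆ l.toFinset := by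
      intro x hx
      rcases Finset.mem_insert.mp hx with rfl | hx
      · exact List.mem_toFinset.mpr hmi
      · exact List.mem_toFinset.mpr (by rwa [Finset.mem_singleton.mp hx])
    have hcard : 2 ≤ l.toFinset.card := by
      have := Finset.card_le_card hsub
      rwa [Finset.card_pair (by omega : i ≠ j)] at this
    have := List.toFinset_card_le l
    omega
  · intro hno
    by_contra hlen
    push Not at hlen
    have h0 : (0 : Nat) < l.length := by omega
    have h1 : (1 : Nat) < l.length := by omega
    have h01 : l[0] < l[1] := List.pairwise_iff_getElem.mp hpw 0 1 h0 h1 (by omega)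
    have hm0 := List.mem_filter.mp
      (show l[0] ∈ (List.range (xs.length - 1)).filter p from List.getElem_mem h0)
    have hm1 := List.mem_filter.mp
      (show l[1] ∈ (List.range (xs.length - 1)).filter p from List.getElem_mem h1)
    have hb1 : l[1] < xs.length - 1 := List.mem_range.mp hm1.1
    exact hno l[0] l[1] h01 (by omega) (by simpa [hp] using hm0.2) (by simpa [hp] using hm1.2)

lemma amod_iff (xs : List Int) : ∀ m s, s + m = xs.length - 1 →
    (amodLoop xs (List.range' s m) = true ↔
      ∀ i j, s ≤ i → i < j → j + 1 < xs.length →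
        xs.getD i 0 ≥ xs.getD (i+1) 0 → xs.getD j 0 ≥ xs.getD (j+1) 0 → False) := by
  intro m
  induction m with
  | zero =>
    intro s hs
    simp only [List.range'_zero, amodLoop, true_iff]
    intro i j hsi hij hj hi hdj
    omega
  | succ m ih =>
    intro s hs
    rw [List.range'_succ]
    by_cases hd : xs.getD s 0 ≥ xs.getD (s+1) 0
    · simp only [amodLoop, if_pos hd]
      rw [si_iff]
      constructor
      · intro h i j hsi hij hj hi hdj
        have hj' : s + 1 ≤ j := by omega
        have := h (j - (s+1)) (by simp; omega)
        rw [getD_drop', getD_drop', show s + 1 + (j - (s+1)) = j from by omega,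
          show s + 1 + (j - (s+1) + 1) = j + 1 from by omega] at this
        exact absurd this (not_lt.mpr hdj)
      · intro h k hk
        rw [getD_drop', getD_drop', show s + 1 + (k+1) = s + 1 + k + 1 from by omega]
        by_contra hge
        push Not at hge
        exact h s (s+1+k) (le_refl s) (by omega) (by simp at hk; omega) hd hge
    · simp only [amodLoop, if_neg hd]
      rw [ih (s+1) (by omega)]
      constructor
      · intro h i j hsi hij hj hi hdj
        rcases Nat.eq_or_lt_of_le hsi with rfl | hlt
        · exact hd hi
        · exact h i j hlt hij hj hi hdj
      · intro h i j hsi hij hj hi hdj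
        exact h i j (by omega) hij hj hi hdj

lemma siE_iff (arr : List Int) :
    strictly_increasing (dI arr).1 = true ↔
      ∀ k, 2*k + 2 < arr.length → arr.getD (2*k) 0 < arr.getD (2*k+2) 0 := by
  rw [si_iff]
  constructor
  · intro h k hk
    have := h k (by rw [length_dI1]; omega)
    rw [getD_dI1, getD_dI1, show 2*(k+1) = 2*k+2 from by ring] at this
    exact this
  · intro h k hk
    rw [length_dI1] at hk
    rw [getD_dI1, getD_dI1, show 2*(k+1) = 2*k+2 from by ring]
    exact h k (by omega)

lemma siO_iff (arr : List Int) :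
    strictly_increasing (dI arr).2 = true ↔
      ∀ k, 2*k + 3 < arr.length → arr.getD (2*k+1) 0 < arr.getD (2*k+3) 0 := by
  rw [si_iff]
  constructor
  · intro h k hk
    have := h k (by rw [length_dI2]; omega)
    rw [getD_dI2, getD_dI2, show 2*(k+1)+1 = 2*k+3 from by ring] at this
    exact this
  · intro h k hk
    rw [length_dI2] at hk
    rw [getD_dI2, getD_dI2, show 2*(k+1)+1 = 2*k+3 from by ring]
    exact h k (by omega)

lemma SK_split (arr : List Int) :
    (∀ j, j + 2 < arr.length → arr.getD j 0 < arr.getD (j+2) 0) ↔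
      ((∀ k, 2*k + 2 < arr.length → arr.getD (2*k) 0 < arr.getD (2*k+2) 0) ∧
       (∀ k, 2*k + 3 < arr.length → arr.getD (2*k+1) 0 < arr.getD (2*k+3) 0)) := by
  constructor
  · intro h
    refine ⟨fun k hk => ?_, fun k hk => ?_⟩
    · exact h (2*k) (by omega)
    · have := h (2*k+1) (by omega)
      rwa [show 2*k+1+2 = 2*k+3 from by ring] at this
  · rintro ⟨he, ho⟩ j hj
    rcases Nat.even_or_odd j with ⟨k, hk⟩ | ⟨k, hk⟩
    · rw [show j = 2*k from by omega]
      exact he k (by omega)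
    · rw [show j = 2*k+1 from by omega, show 2*k+1+2 = 2*k+3 from by ring]
      exact ho k (by omega)

theorem ascending_sequence_spec : Claim_equal_ascending_sequence := by
  intro arr _
  unfold Spec_ascending_sequence
  have hB : ascending_sequence_alt arr =
      (if !(strictly_increasing (dI arr).1 && strictly_increasing (dI arr).2) then false
       else amodLoop arr (List.range (arr.length - 1))) := by
    simp only [ascending_sequence_alt, deinterleave_eq]
  have hA : ascending_sequence arr =
      (decide (dc arr (arr.length - 1) ≤ 1) && okp arr (arr.length - 1)) := by
    unfold ascending_sequence
    rw [loop_inv]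
  rw [hA, hB, Bool.eq_iff_iff]
  constructor
  · intro h
    rw [Bool.and_eq_true, decide_eq_true_iff] at h
    have hno : NoTwo arr := (dcLe1_iff arr).mp h.1
    have hsk := (okp_iff arr).mp h.2
    obtain ⟨hE', hO'⟩ := (SK_split arr).mp hsk
    rw [(siE_iff arr).mpr hE', (siO_iff arr).mpr hO']
    have : amodLoop arr (List.range' 0 (arr.length - 1)) = true :=
      (amod_iff arr (arr.length - 1) 0 (by omega)).mpr (fun i j _ => hno i j)
    rw [List.range_eq_range']
    simpa using this
  · intro h
    cases hE : strictly_increasing (dI arr).1 with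
    | false => rw [hE] at h; simp at h
    | true =>
      cases hO : strictly_increasing (dI arr).2 with
      | false => rw [hE, hO] at h; simp at h
      | true =>
        rw [hE, hO] at h
        simp only [Bool.and_self, Bool.not_true, Bool.false_eq_true, if_false] at h
        rw [List.range_eq_range'] at h
        have hno : NoTwo arr := fun i j hij hj hi hdj =>
          (amod_iff arr (arr.length - 1) 0 (by omega)).mp h i j (Nat.zero_le i) hij hj hi hdj
        have hsk := (SK_split arr).mpr ⟨(siE_iff arr).mp hE, (siO_iff arr).mp hO⟩
        rw [Bool.and_eq_true, decide_eq_true_iff]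
        exact ⟨(dcLe1_iff arr).mpr hno, (okp_iff arr).mpr hsk⟩
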